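-- pv_equiv track=rewrite | github.com/majosaurus/uni-garbage | ib113/examA_2019_zadani.py | is_super_increasing
-- ===== SOURCE A (Python) =====
-- def is_super_increasing(check_list):
--     total = 0
--
--     if len(check_list) == 0:
--         return None
--
--     for i in range(len(check_list)):
--         if total >= check_list[i]:
--             return False
--
--         total += check_list[i]
--
--     return True
-- ===== SOURCE B (Python) =====
-- def is_super_increasing(check_list):
--     if not check_list:
--         return None
--     prefix = [0]
--     for x in check_list:
--         prefix.append(prefix[-1] + x)
--     return all(p < x for p, x in zip(prefix, check_list))
-- ===== Notes on version B (the rewrite author's own statement) =====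
-- stated objective: alternative
-- what changed: Replaces the index loop with an in-loop early return by first materializing the full prefix-sum table and then checking all positions with a separate all() pass over zip(prefix, list).
import Mathlib
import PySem

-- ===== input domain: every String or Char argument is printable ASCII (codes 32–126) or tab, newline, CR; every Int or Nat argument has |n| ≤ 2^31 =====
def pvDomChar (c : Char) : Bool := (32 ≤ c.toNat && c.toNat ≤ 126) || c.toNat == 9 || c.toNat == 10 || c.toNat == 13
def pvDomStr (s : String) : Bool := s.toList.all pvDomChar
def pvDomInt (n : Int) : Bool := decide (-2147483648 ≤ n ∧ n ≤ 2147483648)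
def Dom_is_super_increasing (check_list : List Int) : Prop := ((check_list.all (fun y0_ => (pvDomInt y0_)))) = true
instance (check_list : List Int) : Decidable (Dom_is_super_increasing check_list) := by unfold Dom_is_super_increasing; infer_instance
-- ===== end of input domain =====

-- B builds the full prefix-sum table first, then checks every position in a second pass;
-- A keeps a running total and returns False early inside the single loop. Return values agree everywhere.

-- ===== PORT A =====
-- the for-loop: running total, early return False
def pvLoopA (total : Int) : List Int → Option Bool
  | [] => some true
  | x :: xs => if total ≥ x then some false else pvLoopA (total + x) xs

def is_super_increasing (check_list : List Int) : Option Bool :=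
  if check_list.length = 0 then none else pvLoopA 0 check_list

-- ===== PORT B =====
def is_super_increasing_alt (check_list : List Int) : Option Bool :=
  if check_list = [] then none
  else
    -- prefix = [0]; for x in check_list: prefix.append(prefix[-1] + x)
    let pfx := check_list.foldl (fun p x => p ++ [p.getLast! + x]) [0]
    -- all(p < x for p, x in zip(prefix, check_list))
    some ((pfx.zip check_list).all (fun px => decide (px.1 < px.2)))

-- ===== PRECONDITION & SPEC =====
def Spec_is_super_increasing (check_list : List Int) (out : Option Bool) : Prop := out = is_super_increasing_alt check_list
instance (check_list : List Int) (out : Option Bool) : Decidable (Spec_is_super_increasing check_list out) := by unfold Spec_is_super_increasing; infer_instance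

-- ===== CLAIM (what is proved, stated in full; the proofs are below) =====
def Claim_equal_is_super_increasing : Prop := ∀ (check_list : List Int), Dom_is_super_increasing check_list → Spec_is_super_increasing check_list (is_super_increasing check_list)

-- ===== LEMMAS AND PROOFS =====

-- the "mathematical" scan starting at t
def pvScan (t : Int) : List Int → List Int
  | [] => [t]
  | x :: xs => t :: pvScan (t + x) xs

theorem pvGetLast!_concat (acc : List Int) (t : Int) : (acc ++ [t]).getLast! = t := by
  induction acc with
  | nil => simp [List.getLast!]
  | cons a as ih => cases as <;> simp_all [List.getLast!, List.getLast]

theorem pvFoldl_scan (xs : List Int) : ∀ (acc : List Int) (t : Int),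
    xs.foldl (fun p x => p ++ [p.getLast! + x]) (acc ++ [t]) = acc ++ pvScan t xs := by
  induction xs with
  | nil => intro acc t; simp [pvScan]
  | cons x xs ih =>
    intro acc t
    simp only [List.foldl_cons, pvGetLast!_concat, pvScan]
    have := ih (acc ++ [t]) (t + x)
    simpa using this

theorem pvLoopA_eq (xs : List Int) : ∀ (t : Int),
    pvLoopA t xs = some (((pvScan t xs).zip xs).all (fun px => decide (px.1 < px.2))) := by
  induction xs with
  | nil => intro t; simp [pvLoopA, pvScan]
  | cons x xs ih =>
    intro t
    simp only [pvLoopA, pvScan, List.zip_cons_cons, List.all_cons, ih]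
    by_cases h : t ≥ x
    · simp [h, show ¬ t < x by omega]
    · simp [h, show t < x by omega]

theorem is_super_increasing_eq (l : List Int) : is_super_increasing l = is_super_increasing_alt l := by
  unfold is_super_increasing is_super_increasing_alt
  cases l with
  | nil => simp
  | cons x xs =>
    rw [if_neg (by simp), if_neg (by simp)]
    have hfold := pvFoldl_scan (x :: xs) [] 0
    simp only [List.nil_append] at hfold
    rw [pvLoopA_eq]
    simp only [hfold]

-- ===== VERDICT (by name: the statement is the Claim_ definition above) =====
theorem is_super_increasing_spec : Claim_equal_is_super_increasing := by
  intro l _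
  unfold Spec_is_super_increasing
  exact is_super_increasing_eq l
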